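-- pv_equiv track=rewrite | github.com/LeInS-dev/owasp-wstg-framework | core/utils.py | extract_tech_from_headers
-- ===== SOURCE A (Python) =====
-- from typing import List, Dict, Optional, Tuple, Any
--
-- def extract_tech_from_headers(headers: Dict[str, str]) -> List[str]:
--     """Extrae tecnología de headers HTTP"""
--     technologies = []
--
--     tech_indicators = {
--         'server': ['apache', 'nginx', 'iis', 'litespeed', 'caddy'],
--         'x-powered-by': ['php', 'asp.net', 'express', 'python', 'ruby', 'java'],
--         'x-generator': ['wordpress', 'drupal', 'joomla', 'ghost'],
--         'x-aspnet-version': ['asp.net'],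
--         'x-drupal-cache': ['drupal'],
--     }
--
--     for header, value in headers.items():
--         header_lower = header.lower()
--         value_lower = value.lower()
--
--         if header_lower in tech_indicators:
--             for tech in tech_indicators[header_lower]:
--                 if tech in value_lower:
--                     technologies.append(tech)
--
--     return list(set(technologies))
-- ===== SOURCE B (Python) =====
-- def extract_tech_from_headers(headers):
--     """Extrae tecnologia de headers HTTP (flat (header, tech) pair table + set comprehension)."""
--     pairs = [
--         ('server', 'apache'), ('server', 'nginx'), ('server', 'iis'),
--         ('server', 'litespeed'), ('server', 'caddy'),
--         ('x-powered-by', 'php'), ('x-powered-by', 'asp.net'), ('x-powered-by', 'express'),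
--         ('x-powered-by', 'python'), ('x-powered-by', 'ruby'), ('x-powered-by', 'java'),
--         ('x-generator', 'wordpress'), ('x-generator', 'drupal'), ('x-generator', 'joomla'),
--         ('x-generator', 'ghost'),
--         ('x-aspnet-version', 'asp.net'),
--         ('x-drupal-cache', 'drupal'),
--     ]
--     technologies = {t for (k, t) in pairs
--                     if any(h.lower() == k and t in v.lower() for h, v in headers.items())}
--     return list(technologies)
-- ===== Notes on version B (the rewrite author's own statement) =====
-- stated objective: alternative
-- what changed: B replaces the header-driven loop with a dict lookup and nested substring loop by a flat (header-name, tech) pair table filtered with a single set comprehension that tests each pair against the headers, so there is no dict, no nested append loop and no duplicate-building list.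
import Mathlib
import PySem

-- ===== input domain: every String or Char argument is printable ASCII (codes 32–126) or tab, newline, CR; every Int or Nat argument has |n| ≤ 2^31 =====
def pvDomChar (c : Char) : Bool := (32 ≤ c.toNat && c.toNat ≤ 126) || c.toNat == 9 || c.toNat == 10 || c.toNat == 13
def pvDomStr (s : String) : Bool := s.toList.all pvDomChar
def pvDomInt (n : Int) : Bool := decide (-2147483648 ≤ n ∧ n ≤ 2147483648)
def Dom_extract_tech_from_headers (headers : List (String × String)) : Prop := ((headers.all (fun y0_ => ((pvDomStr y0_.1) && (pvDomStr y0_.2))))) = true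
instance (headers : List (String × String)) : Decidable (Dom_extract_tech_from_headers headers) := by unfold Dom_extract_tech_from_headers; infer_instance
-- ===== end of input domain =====

-- B replaces A's header-driven nested loops over a dict by a flat (header-name, tech) pair table
-- filtered in one pass against the headers; same set of results. Python's list(set(...)) order is
-- hash-dependent and not modelled: both ports return the sorted distinct technologies — exact as a
-- set, which is how the set-built output is compared.

-- ===== PORT A =====
-- the tech_indicators dict literal of A
def pvTechTable : PySem.Dict String (List String) :=
  PySem.Dict.ofList
    [("server", ["apache", "nginx", "iis", "litespeed", "caddy"]),
     ("x-powered-by", ["php", "asp.net", "express", "python", "ruby", "java"]),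
     ("x-generator", ["wordpress", "drupal", "joomla", "ghost"]),
     ("x-aspnet-version", ["asp.net"]),
     ("x-drupal-cache", ["drupal"])]

def extract_tech_from_headers (headers : List (String × String)) : List String :=
  let technologies : List String :=
    headers.foldl (fun acc hv =>
      let header_lower := PySem.Str.lower hv.1
      let value_lower := PySem.Str.lower hv.2
      -- 'if header_lower in tech_indicators: for tech in tech_indicators[header_lower]: …'
      match PySem.Dict.get? pvTechTable header_lower with
      | some ts => ts.foldl (fun a tech => if PySem.Str.isIn tech value_lower then a ++ [tech] else a) acc
      | none => acc) []
  -- list(set(technologies)) — canonicalized to sorted order (set order is not modelled)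
  PySem.List.sorted (PySem.Set.ofList technologies) (fun x => x) false

-- ===== PORT B =====
-- the flat 'pairs' list literal of B
def pvTechPairs : List (String × String) :=
  [("server", "apache"), ("server", "nginx"), ("server", "iis"),
   ("server", "litespeed"), ("server", "caddy"),
   ("x-powered-by", "php"), ("x-powered-by", "asp.net"), ("x-powered-by", "express"),
   ("x-powered-by", "python"), ("x-powered-by", "ruby"), ("x-powered-by", "java"),
   ("x-generator", "wordpress"), ("x-generator", "drupal"), ("x-generator", "joomla"),
   ("x-generator", "ghost"),
   ("x-aspnet-version", "asp.net"),
   ("x-drupal-cache", "drupal")]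

def extract_tech_from_headers_alt (headers : List (String × String)) : List String :=
  -- '{t for (k, t) in pairs if any(h.lower() == k and t in v.lower() for h, v in headers.items())}'
  let technologies : List String :=
    (pvTechPairs.filter (fun kt =>
      headers.any (fun hv =>
        PySem.Str.lower hv.1 == kt.1 && PySem.Str.isIn kt.2 (PySem.Str.lower hv.2)))).map Prod.snd
  -- list({…}) — canonicalized to sorted order (set order is not modelled)
  PySem.List.sorted (PySem.Set.ofList technologies) (fun x => x) false

-- ===== PRECONDITION & SPEC =====
def Spec_extract_tech_from_headers (headers : List (String × String)) (out : List String) : Prop := out = extract_tech_from_headers_alt headers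
instance (headers : List (String × String)) (out : List String) : Decidable (Spec_extract_tech_from_headers headers out) := by unfold Spec_extract_tech_from_headers; infer_instance

-- ===== CLAIM (what is proved, stated in full; the proofs are below) =====
def Claim_equal_extract_tech_from_headers : Prop := ∀ (headers : List (String × String)), Dom_extract_tech_from_headers headers → Spec_extract_tech_from_headers headers (extract_tech_from_headers headers)

-- ===== LEMMAS AND PROOFS =====

def pvGA (hv : String × String) : List String :=
  match PySem.Dict.get? pvTechTable (PySem.Str.lower hv.1) with
  | some ts => ts.filter (fun tech => PySem.Str.isIn tech (PySem.Str.lower hv.2))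
  | none => []

lemma pvA_techs (headers : List (String × String)) :
    headers.foldl (fun acc hv =>
      match PySem.Dict.get? pvTechTable (PySem.Str.lower hv.1) with
      | some ts => ts.foldl (fun a tech =>
          if PySem.Str.isIn tech (PySem.Str.lower hv.2) then a ++ [tech] else a) acc
      | none => acc) [] = headers.flatMap pvGA := by
  suffices hgen : ∀ acc : List String, headers.foldl (fun acc hv =>
      match PySem.Dict.get? pvTechTable (PySem.Str.lower hv.1) with
      | some ts => ts.foldl (fun a tech =>
          if PySem.Str.isIn tech (PySem.Str.lower hv.2) then a ++ [tech] else a) acc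
      | none => acc) acc = acc ++ headers.flatMap pvGA by
    simpa using hgen []
  induction headers with
  | nil => simp
  | cons hd tl ih =>
    intro acc
    simp only [List.foldl_cons, List.flatMap_cons, ih]
    have hstep : (match PySem.Dict.get? pvTechTable (PySem.Str.lower hd.1) with
       | some ts => ts.foldl (fun a tech =>
           if PySem.Str.isIn tech (PySem.Str.lower hd.2) then a ++ [tech] else a) acc
       | none => acc) = acc ++ pvGA hd := by
      unfold pvGA
      cases PySem.Dict.get? pvTechTable (PySem.Str.lower hd.1) with
      | none => simp
      | some ts => simp [PySem.List.foldl_append_if_eq_filter]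
    rw [hstep, List.append_assoc]

lemma pv_pairs_eq :
    pvTechPairs = pvTechTable.items.flatMap (fun kt => kt.2.map (fun t => (kt.1, t))) := by decide

lemma pv_mem_iff (headers : List (String × String)) (t : String) :
    t ∈ headers.flatMap pvGA ↔
    t ∈ (pvTechPairs.filter (fun kt =>
          headers.any (fun hv =>
            PySem.Str.lower hv.1 == kt.1 && PySem.Str.isIn kt.2 (PySem.Str.lower hv.2)))).map
        Prod.snd := by
  have hnodup : pvTechTable.keys.Nodup := by decide
  rw [pv_pairs_eq]
  simp only [List.mem_flatMap, List.mem_map, List.mem_filter, List.any_eq_true,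
    Bool.and_eq_true, beq_iff_eq]
  constructor
  · rintro ⟨hv, hmem, ht⟩
    unfold pvGA at ht
    cases hget : PySem.Dict.get? pvTechTable (PySem.Str.lower hv.1) with
    | none => rw [hget] at ht; simp at ht
    | some ts =>
      rw [hget] at ht
      simp only [List.mem_filter] at ht
      refine ⟨(PySem.Str.lower hv.1, t), ⟨?_, hv, hmem, rfl, ht.2⟩, rfl⟩
      exact ⟨(PySem.Str.lower hv.1, ts),
        PySem.Dict.mem_items_of_get?_eq_some pvTechTable hget, t, ht.1, rfl⟩
  · rintro ⟨kt, ⟨⟨it, hitmem, t', ht', hpair⟩, hv, hmemh, hkey, hin⟩, rfl⟩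
    obtain ⟨h1, h2⟩ : kt.1 = it.1 ∧ kt.2 = t' := by
      cases hpair; exact ⟨rfl, rfl⟩
    refine ⟨hv, hmemh, ?_⟩
    unfold pvGA
    rw [hkey, h1,
      (PySem.Dict.get?_eq_some_iff_mem_items pvTechTable it.1 it.2 hnodup).mpr (by simpa using hitmem)]
    simp only [List.mem_filter]
    exact ⟨h2 ▸ ht', hin⟩

lemma pv_final (headers : List (String × String)) :
    PySem.List.sorted (PySem.Set.ofList (headers.flatMap pvGA)) (fun x => x) false =
    PySem.List.sorted (PySem.Set.ofList
      ((pvTechPairs.filter (fun kt =>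
          headers.any (fun hv =>
            PySem.Str.lower hv.1 == kt.1 && PySem.Str.isIn kt.2 (PySem.Str.lower hv.2)))).map
        Prod.snd)) (fun x => x) false := by
  set l2 := (pvTechPairs.filter (fun kt =>
      headers.any (fun hv =>
        PySem.Str.lower hv.1 == kt.1 && PySem.Str.isIn kt.2 (PySem.Str.lower hv.2)))).map
    Prod.snd with hl2
  have hperm : (PySem.Set.ofList (headers.flatMap pvGA)).Perm (PySem.Set.ofList l2) :=
    (List.perm_ext_iff_of_nodup (PySem.Set.nodup_ofList _) (PySem.Set.nodup_ofList _)).mpr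
      (fun a => by simp only [PySem.Set.mem_ofList]; exact pv_mem_iff headers a)
  have h1 : (PySem.List.sorted (PySem.Set.ofList l2) (fun x => x) false).Perm
      (PySem.Set.ofList (headers.flatMap pvGA)) :=
    (PySem.List.sorted_perm _ _ _).trans hperm.symm
  have h2 := (PySem.List.sorted_ofList_pairwise_lt l2).imp (fun h => le_of_lt h)
  exact PySem.List.sorted_id_eq_of_perm_of_pairwise _ _ h1 h2

-- ===== VERDICT (by name: the statement is the Claim_ definition above) =====
theorem extract_tech_from_headers_spec : Claim_equal_extract_tech_from_headers := by
  intro headers _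
  unfold Spec_extract_tech_from_headers extract_tech_from_headers extract_tech_from_headers_alt
  simp only []
  rw [pvA_techs]
  exact pv_final headers
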